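-- pv_equiv track=rewrite | github.com/henry930/SolidiMobileApp4-test | scripts/generate_api_docs.py | categorize_apis
-- ===== SOURCE A (Python) =====
-- def categorize_apis(apis):
--     """Group APIs by category"""
--     categories = {
--         'Authentication & User': [],
--         'Trading & Orders': [],
--         'Wallet & Balance': [],
--         'Market Data': [],
--         'Deposits & Withdrawals': [],
--         'Verification & KYC': [],
--         'Account Management': [],
--         'System': [],
--         'Other': []
--     }
--
--     for api in apis:
--         route = api['route']
--
--         if any(x in route for x in ['login', 'register', 'credentials', 'password', 'email', 'mobile', 'phone', 'confirm_']):
--             categories['Authentication & User'].append(api)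
--         elif any(x in route for x in ['buy', 'sell', 'order', 'trade']):
--             categories['Trading & Orders'].append(api)
--         elif any(x in route for x in ['balance', 'fee', 'ticker', 'price', 'wallet']):
--             categories['Wallet & Balance'].append(api)
--         elif any(x in route for x in ['market', 'asset', 'ticker', 'historic']):
--             categories['Market Data'].append(api)
--         elif any(x in route for x in ['deposit', 'withdraw', 'addressBook', 'default_account']):
--             categories['Deposits & Withdrawals'].append(api)
--         elif any(x in route for x in ['identity', 'verification', 'extra_information', 'document']):
--             categories['Verification & KYC'].append(api)
--         elif any(x in route for x in ['user', 'account', 'deletion']):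
--             categories['Account Management'].append(api)
--         elif any(x in route for x in ['api_latest', 'app_latest', 'version']):
--             categories['System'].append(api)
--         else:
--             categories['Other'].append(api)
--
--     return categories
-- ===== SOURCE B (Python) =====
-- _RULES = [
--     ('Authentication & User', ['login', 'register', 'credentials', 'password', 'email', 'mobile', 'phone', 'confirm_']),
--     ('Trading & Orders', ['buy', 'sell', 'order', 'trade']),
--     ('Wallet & Balance', ['balance', 'fee', 'ticker', 'price', 'wallet']),
--     ('Market Data', ['market', 'asset', 'ticker', 'historic']),
--     ('Deposits & Withdrawals', ['deposit', 'withdraw', 'addressBook', 'default_account']),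
--     ('Verification & KYC', ['identity', 'verification', 'extra_information', 'document']),
--     ('Account Management', ['user', 'account', 'deletion']),
--     ('System', ['api_latest', 'app_latest', 'version']),
-- ]
--
--
-- def _category(api):
--     """First rule (in priority order) whose keyword occurs in the route; else 'Other'."""
--     route = api['route']
--     for name, keywords in _RULES:
--         if any(x in route for x in keywords):
--             return name
--     return 'Other'
--
--
-- def categorize_apis(apis):
--     """Group APIs by category"""
--     names = [name for name, _ in _RULES] + ['Other']
--     return {n: [api for api in apis if _category(api) == n] for n in names}
-- ===== Notes on version B (the rewrite author's own statement) =====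
-- stated objective: simpler
-- what changed: Replaces the nine-way elif cascade appending into a mutable dict with a data-driven rule table: a first-match classifier over an ordered (name, keywords) list, and the result built as one per-category comprehension over that table.
import Mathlib
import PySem

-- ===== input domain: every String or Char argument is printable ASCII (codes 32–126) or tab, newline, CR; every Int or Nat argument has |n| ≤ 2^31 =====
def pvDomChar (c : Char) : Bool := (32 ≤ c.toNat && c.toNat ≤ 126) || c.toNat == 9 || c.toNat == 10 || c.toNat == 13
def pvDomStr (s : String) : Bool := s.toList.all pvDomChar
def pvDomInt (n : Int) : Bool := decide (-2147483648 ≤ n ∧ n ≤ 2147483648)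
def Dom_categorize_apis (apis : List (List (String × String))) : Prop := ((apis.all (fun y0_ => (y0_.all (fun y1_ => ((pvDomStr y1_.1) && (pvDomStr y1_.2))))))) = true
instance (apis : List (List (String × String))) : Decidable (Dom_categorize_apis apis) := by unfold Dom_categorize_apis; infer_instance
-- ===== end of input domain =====

-- B replaces A's elif cascade into a mutable dict by a rule-table classifier plus
-- per-category comprehensions (objective: simpler). Equivalence is about the return value.

-- ===== PORT A =====
-- literal transliteration of A: a dict of nine empty lists, one loop over apis, an
-- if/elif cascade appending the api to the matching category's list
def categorize_apis (apis : List (List (String × String))) : List (String × List (List (String × String))) :=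
  let categories : PySem.Dict String (List (List (String × String))) :=
    PySem.Dict.mk [("Authentication & User", []), ("Trading & Orders", []), ("Wallet & Balance", []),
      ("Market Data", []), ("Deposits & Withdrawals", []), ("Verification & KYC", []),
      ("Account Management", []), ("System", []), ("Other", [])]
  let final := apis.foldl (fun categories api =>
    let route := (PySem.Dict.mk api).getD "route" ""   -- api['route']; Pre_ excludes the KeyError case
    if (["login", "register", "credentials", "password", "email", "mobile", "phone", "confirm_"]).any (fun x => PySem.Str.isIn x route) then
      categories.modify "Authentication & User" [] (· ++ [api])
    else if (["buy", "sell", "order", "trade"]).any (fun x => PySem.Str.isIn x route) then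
      categories.modify "Trading & Orders" [] (· ++ [api])
    else if (["balance", "fee", "ticker", "price", "wallet"]).any (fun x => PySem.Str.isIn x route) then
      categories.modify "Wallet & Balance" [] (· ++ [api])
    else if (["market", "asset", "ticker", "historic"]).any (fun x => PySem.Str.isIn x route) then
      categories.modify "Market Data" [] (· ++ [api])
    else if (["deposit", "withdraw", "addressBook", "default_account"]).any (fun x => PySem.Str.isIn x route) then
      categories.modify "Deposits & Withdrawals" [] (· ++ [api])
    else if (["identity", "verification", "extra_information", "document"]).any (fun x => PySem.Str.isIn x route) then
      categories.modify "Verification & KYC" [] (· ++ [api])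
    else if (["user", "account", "deletion"]).any (fun x => PySem.Str.isIn x route) then
      categories.modify "Account Management" [] (· ++ [api])
    else if (["api_latest", "app_latest", "version"]).any (fun x => PySem.Str.isIn x route) then
      categories.modify "System" [] (· ++ [api])
    else
      categories.modify "Other" [] (· ++ [api])) categories
  final.items

-- ===== PORT B =====
-- the ordered rule table _RULES of Source B
def pvRules : List (String × List String) :=
  [("Authentication & User", ["login", "register", "credentials", "password", "email", "mobile", "phone", "confirm_"]),
   ("Trading & Orders", ["buy", "sell", "order", "trade"]),
   ("Wallet & Balance", ["balance", "fee", "ticker", "price", "wallet"]),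
   ("Market Data", ["market", "asset", "ticker", "historic"]),
   ("Deposits & Withdrawals", ["deposit", "withdraw", "addressBook", "default_account"]),
   ("Verification & KYC", ["identity", "verification", "extra_information", "document"]),
   ("Account Management", ["user", "account", "deletion"]),
   ("System", ["api_latest", "app_latest", "version"])]

-- the for-loop of _category: first rule whose keyword occurs in route, else 'Other'
def pvFirstMatch (route : String) : List (String × List String) → String
  | [] => "Other"
  | r :: rs => if r.2.any (fun x => PySem.Str.isIn x route) then r.1 else pvFirstMatch route rs

def pvCategory (api : List (String × String)) : String :=
  let route := (PySem.Dict.mk api).getD "route" ""   -- api['route']; Pre_ excludes the KeyError case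
  pvFirstMatch route pvRules

def categorize_apis_alt (apis : List (List (String × String))) : List (String × List (List (String × String))) :=
  (pvRules.map Prod.fst ++ ["Other"]).map (fun n => (n, apis.filter (fun api => pvCategory api == n)))

-- ===== PRECONDITION & SPEC =====
-- Pre_ excludes apis without a 'route' key: there Python A raises KeyError (and B raises too).
def Pre_categorize_apis (apis : List (List (String × String))) : Prop :=
  (apis.all (fun api => (PySem.Dict.mk api).contains "route")) = true
instance (apis : List (List (String × String))) : Decidable (Pre_categorize_apis apis) := by
  unfold Pre_categorize_apis; infer_instance

def pvWitness_categorize_apis : (List (List (String × String))) :=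
  [[("route", "get_user_balance")], [("route", "login"), ("method", "POST")]]

def Spec_categorize_apis (apis : List (List (String × String))) (out : List (String × List (List (String × String)))) : Prop := out = categorize_apis_alt apis
instance (apis : List (List (String × String))) (out : List (String × List (List (String × String)))) : Decidable (Spec_categorize_apis apis out) := by unfold Spec_categorize_apis; infer_instance

-- ===== CLAIM (what is proved, stated in full; the proofs are below) =====
def Claim_equal_categorize_apis : Prop := ∀ (apis : List (List (String × String))), Dom_categorize_apis apis → Pre_categorize_apis apis → Spec_categorize_apis apis (categorize_apis apis)

-- ===== LEMMAS AND PROOFS =====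

-- A's loop body appends the api to exactly the category pvCategory picks
theorem pv_step_eq (d : PySem.Dict String (List (List (String × String)))) (api : List (String × String)) :
    (let route := (PySem.Dict.mk api).getD "route" ""
     if (["login", "register", "credentials", "password", "email", "mobile", "phone", "confirm_"]).any (fun x => PySem.Str.isIn x route) then
       d.modify "Authentication & User" [] (· ++ [api])
     else if (["buy", "sell", "order", "trade"]).any (fun x => PySem.Str.isIn x route) then
       d.modify "Trading & Orders" [] (· ++ [api])
     else if (["balance", "fee", "ticker", "price", "wallet"]).any (fun x => PySem.Str.isIn x route) then
       d.modify "Wallet & Balance" [] (· ++ [api])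
     else if (["market", "asset", "ticker", "historic"]).any (fun x => PySem.Str.isIn x route) then
       d.modify "Market Data" [] (· ++ [api])
     else if (["deposit", "withdraw", "addressBook", "default_account"]).any (fun x => PySem.Str.isIn x route) then
       d.modify "Deposits & Withdrawals" [] (· ++ [api])
     else if (["identity", "verification", "extra_information", "document"]).any (fun x => PySem.Str.isIn x route) then
       d.modify "Verification & KYC" [] (· ++ [api])
     else if (["user", "account", "deletion"]).any (fun x => PySem.Str.isIn x route) then
       d.modify "Account Management" [] (· ++ [api])
     else if (["api_latest", "app_latest", "version"]).any (fun x => PySem.Str.isIn x route) then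
       d.modify "System" [] (· ++ [api])
     else
       d.modify "Other" [] (· ++ [api]))
    = d.modify (pvCategory api) [] (· ++ [api]) := by
  simp only [pvCategory, pvRules, pvFirstMatch]
  split_ifs <;> rfl

-- pvCategory always names one of the nine initial keys
theorem pv_cat_contains (d : PySem.Dict String (List (List (String × String)))) (api : List (String × String))
    (h : d.keys = ["Authentication & User", "Trading & Orders", "Wallet & Balance", "Market Data",
      "Deposits & Withdrawals", "Verification & KYC", "Account Management", "System", "Other"]) :
    d.contains (pvCategory api) = true := by
  rw [PySem.Dict.contains_iff_mem_keys, h]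
  simp only [pvCategory, pvRules, pvFirstMatch]
  split_ifs <;> simp

-- the grouping loop leaves the key list unchanged and appends each api at its category
theorem pv_fold_keys (l : List (List (String × String))) (d : PySem.Dict String (List (List (String × String))))
    (h : d.keys = ["Authentication & User", "Trading & Orders", "Wallet & Balance", "Market Data",
      "Deposits & Withdrawals", "Verification & KYC", "Account Management", "System", "Other"]) :
    (l.foldl (fun d api => d.modify (pvCategory api) [] (· ++ [api])) d).keys = d.keys := by
  induction l generalizing d with
  | nil => rfl
  | cons a t ih =>
    have hk : (d.modify (pvCategory a) [] (· ++ [a])).keys = d.keys := by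
      rw [PySem.Dict.keys_modify, PySem.Dict.keys_insert_of_contains _ _ (pv_cat_contains d a h)]
    simp only [List.foldl_cons]
    rw [ih _ (by rw [hk, h]), hk]

theorem pv_fold_getD (l : List (List (String × String))) (d : PySem.Dict String (List (List (String × String))))
    (c : String) :
    (l.foldl (fun d api => d.modify (pvCategory api) [] (· ++ [api])) d).getD c []
      = d.getD c [] ++ l.filter (fun api => pvCategory api == c) := by
  induction l generalizing d with
  | nil => simp
  | cons a t ih =>
    simp only [List.foldl_cons, List.filter_cons, ih]
    rw [PySem.Dict.getD_modify]
    by_cases h : c = pvCategory a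
    · simp [h]
    · simp [h, Ne.symm h]

-- ===== VERDICT (by name: the statement is the Claim_ definition above) =====
theorem categorize_apis_spec : Claim_equal_categorize_apis := by
  intro apis _ _
  unfold Spec_categorize_apis categorize_apis categorize_apis_alt
  have hstep : (fun (d : PySem.Dict String (List (List (String × String)))) (api : List (String × String)) =>
      (let route := (PySem.Dict.mk api).getD "route" ""
       if (["login", "register", "credentials", "password", "email", "mobile", "phone", "confirm_"]).any (fun x => PySem.Str.isIn x route) then
         d.modify "Authentication & User" [] (· ++ [api])
       else if (["buy", "sell", "order", "trade"]).any (fun x => PySem.Str.isIn x route) then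
         d.modify "Trading & Orders" [] (· ++ [api])
       else if (["balance", "fee", "ticker", "price", "wallet"]).any (fun x => PySem.Str.isIn x route) then
         d.modify "Wallet & Balance" [] (· ++ [api])
       else if (["market", "asset", "ticker", "historic"]).any (fun x => PySem.Str.isIn x route) then
         d.modify "Market Data" [] (· ++ [api])
       else if (["deposit", "withdraw", "addressBook", "default_account"]).any (fun x => PySem.Str.isIn x route) then
         d.modify "Deposits & Withdrawals" [] (· ++ [api])
       else if (["identity", "verification", "extra_information", "document"]).any (fun x => PySem.Str.isIn x route) then
         d.modify "Verification & KYC" [] (· ++ [api])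
       else if (["user", "account", "deletion"]).any (fun x => PySem.Str.isIn x route) then
         d.modify "Account Management" [] (· ++ [api])
       else if (["api_latest", "app_latest", "version"]).any (fun x => PySem.Str.isIn x route) then
         d.modify "System" [] (· ++ [api])
       else
         d.modify "Other" [] (· ++ [api])))
      = (fun d api => d.modify (pvCategory api) [] (· ++ [api])) := by
    funext d api; exact pv_step_eq d api
  rw [hstep]
  set d0 : PySem.Dict String (List (List (String × String))) :=
    PySem.Dict.mk [("Authentication & User", []), ("Trading & Orders", []), ("Wallet & Balance", []),
      ("Market Data", []), ("Deposits & Withdrawals", []), ("Verification & KYC", []),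
      ("Account Management", []), ("System", []), ("Other", [])] with hd0
  have hkeys0 : d0.keys = ["Authentication & User", "Trading & Orders", "Wallet & Balance", "Market Data",
      "Deposits & Withdrawals", "Verification & KYC", "Account Management", "System", "Other"] := by
    rw [hd0]; rfl
  have hkeys := pv_fold_keys apis d0 hkeys0
  have hnodup : (apis.foldl (fun d api => d.modify (pvCategory api) [] (· ++ [api])) d0).keys.Nodup := by
    rw [hkeys, hkeys0]; decide
  rw [PySem.Dict.items_eq_map_keys _ hnodup ([] : List (List (String × String)))]
  rw [hkeys, hkeys0]
  have hgetD0 : ∀ c : String, d0.getD c [] = [] := by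
    intro c
    rw [hd0]
    simp only [PySem.Dict.getD_eq_get?_getD, PySem.Dict.get?_mk_cons]
    split_ifs <;> rfl
  have hnames : pvRules.map Prod.fst ++ ["Other"]
      = ["Authentication & User", "Trading & Orders", "Wallet & Balance", "Market Data",
         "Deposits & Withdrawals", "Verification & KYC", "Account Management", "System", "Other"] := rfl
  rw [hnames]
  apply List.map_congr_left
  intro c _
  rw [pv_fold_getD, hgetD0]
  rfl
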